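-- pv_equiv track=rewrite | github.com/chaosen315/AIwork4translator | modules/read_tool.py | _is_sentence_midpage_break
-- ===== SOURCE A (Python) =====
-- def _is_sentence_midpage_break(block_A_content: str, block_B_content: str) -> bool:
--     """
--     严格检测句中跨页无标点缓冲。
--     根据用户提供的算法，判断 block_B 是否是 block_A 未完成句子的延续。
--     """
--     # 预处理：清理空白
--     tail_A = block_A_content.rstrip()
--     head_B = block_B_content.lstrip()
--
--     if not tail_A or not head_B:
--         return False
--
--     # ────── 否决条件（立即返回False）──────
--     # 1. Block A 以句末标点结尾
--     if tail_A.endswith(('.', '?', '!')):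
--         return False
--
--     # 2. Block A 是常见缩写结尾
--     ABBR_ENDINGS = {'e.g.', 'i.e.', 'et al.', 'Dr.', 'Prof.', 'Fig.', 'Table.',
--                     'vs.', 'cf.', 'pp.', 'No.', 'vol.', 'Sec.'}
--     if any(tail_A.endswith(abbr) for abbr in ABBR_ENDINGS):
--         return False
--
--     # 3. Block A 以连字符结尾（合法拆分）
--     if tail_A.endswith('-'):
--         return False
--
--     # 4. Block B 以大写开头（极可能是新句）
--     if head_B[0].isupper():
--         return False
--
--     # 5. Block B 是章节标题信号
--     if any(head_B.startswith(pattern) for pattern in ['Chapter', 'Section', 'Figure', 'Table']):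
--         return False
--
--     # ────── 阳性信号（计分系统）──────
--     score = 0
--
--     # 信号1：Block B 首词是延续性词汇
--     CONTINUATION_WORDS = {
--         # 连词
--         'and', 'but', 'or', 'yet', 'so', 'for', 'nor',
--         # 代词
--         'this', 'that', 'these', 'those', 'which', 'who', 'whom',
--         # 介词（句中）
--         'in', 'on', 'at', 'by', 'with', 'from', 'to', 'of',
--         # 副词
--         'however', 'therefore', 'thus', 'hence', 'then', 'also'
--     }
--
--     try:
--         first_word = head_B.split()[0].lower().rstrip(',;:')
--         if first_word in CONTINUATION_WORDS:
--             score += 50  # 最强信号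
--     except IndexError:
--         pass # head_B 为空或只有空白
--
--     # 信号2：Block A 尾词是句中词汇
--     try:
--         last_word = tail_A.split()[-1].lower()
--         if last_word not in {'conclusion', 'summary', 'result', 'effect'}:
--             score += 10
--     except IndexError:
--         pass # tail_A 为空或只有空白
--
--     # 信号3：Block B 开头字符小写（已保证不是新句）
--     score += 20
--
--     # ────── 阈值判定 ──────
--     return score >= 60
-- ===== SOURCE B (Python) =====
-- # B: same five veto guards, but the dead scoring system is removed: the result is True
-- # iff the continuation-word signal fires (50+20 >= 60 always; 10+20 < 60 always), and the
-- # abbreviation check is dead too (every abbreviation ends with '.', already vetoed).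
-- _CONTINUATION_WORDS = frozenset({
--     'and', 'but', 'or', 'yet', 'so', 'for', 'nor',
--     'this', 'that', 'these', 'those', 'which', 'who', 'whom',
--     'in', 'on', 'at', 'by', 'with', 'from', 'to', 'of',
--     'however', 'therefore', 'thus', 'hence', 'then', 'also'
-- })
--
--
-- def _is_sentence_midpage_break(block_A_content: str, block_B_content: str) -> bool:
--     tail_A = block_A_content.rstrip()
--     head_B = block_B_content.lstrip()
--     if not tail_A or not head_B:
--         return False
--     if tail_A.endswith(('.', '?', '!', '-')):
--         return False
--     if head_B[0].isupper() or head_B.startswith(('Chapter', 'Section', 'Figure', 'Table')):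
--         return False
--     return head_B.split()[0].lower().rstrip(',;:') in _CONTINUATION_WORDS
-- ===== Notes on version B (the rewrite author's own statement) =====
-- stated objective: simpler
-- what changed: B keeps the veto guards but deletes the whole score/threshold machinery (and the tail-word split pass it needs) and the dead abbreviation scan: the result is exactly 'first word of head_B is a continuation word', since 50+20 always reaches the 60 threshold and 10+20 never does, and every abbreviation ends with '.' which is already vetoed.
import Mathlib
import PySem

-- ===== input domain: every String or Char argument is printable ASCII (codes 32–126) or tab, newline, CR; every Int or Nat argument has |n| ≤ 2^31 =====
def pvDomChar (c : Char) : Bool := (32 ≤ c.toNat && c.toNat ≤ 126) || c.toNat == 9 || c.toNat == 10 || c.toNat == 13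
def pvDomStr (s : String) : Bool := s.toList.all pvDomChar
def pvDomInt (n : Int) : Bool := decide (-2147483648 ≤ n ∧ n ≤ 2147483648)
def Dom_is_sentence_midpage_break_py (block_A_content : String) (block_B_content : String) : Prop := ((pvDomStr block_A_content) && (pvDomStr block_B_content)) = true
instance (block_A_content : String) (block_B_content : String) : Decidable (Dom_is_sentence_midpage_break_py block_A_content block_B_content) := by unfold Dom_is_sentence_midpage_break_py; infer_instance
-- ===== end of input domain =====

-- ===== PORT A =====
-- hand-ported (PySem has no rstrip-with-chars): Python's str.rstrip(',;:') = drop trailing ',', ';', ':' characters; exact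
def pvRstripPunct (cs : List Char) : List Char :=
  (cs.reverse.dropWhile (fun c => c == ',' || c == ';' || c == ':')).reverse

def pvAbbrEndings : List String :=
  ["e.g.", "i.e.", "et al.", "Dr.", "Prof.", "Fig.", "Table.",
   "vs.", "cf.", "pp.", "No.", "vol.", "Sec."]

def pvContinuationWords : List String :=
  ["and", "but", "or", "yet", "so", "for", "nor",
   "this", "that", "these", "those", "which", "who", "whom",
   "in", "on", "at", "by", "with", "from", "to", "of",
   "however", "therefore", "thus", "hence", "then", "also"]

def is_sentence_midpage_break_py (block_A_content : String) (block_B_content : String) : Bool :=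
  let tail_A := PySem.Str.rstrip block_A_content
  let head_B := PySem.Str.lstrip block_B_content
  if PySem.Str.len tail_A == 0 || PySem.Str.len head_B == 0 then false
  else if PySem.Str.endswith tail_A "." || PySem.Str.endswith tail_A "?" ||
          PySem.Str.endswith tail_A "!" then false
  else if pvAbbrEndings.any (fun abbr => PySem.Str.endswith tail_A abbr) then false
  else if PySem.Str.endswith tail_A "-" then false
  else if (match head_B.toList with
           | c :: _ => PySem.Chars.isupper c
           | [] => false) then false
  else if ["Chapter", "Section", "Figure", "Table"].any
            (fun pat => PySem.Str.startswith head_B pat) then false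
  else
    -- signal 1 (try/except IndexError: empty split contributes 0)
    let score1 : Int :=
      match PySem.Str.split₀ head_B with
      | [] => 0
      | w :: _ =>
        if pvContinuationWords.contains (String.mk (pvRstripPunct (PySem.Str.lower w).toList))
        then 50 else 0
    -- signal 2 (split()[-1] = head of the reversed split)
    let score2 : Int :=
      match (PySem.Str.split₀ tail_A).reverse with
      | [] => 0
      | w :: _ =>
        if (["conclusion", "summary", "result", "effect"] : List String).contains
             (PySem.Str.lower w)
        then 0 else 10
    -- signal 3 always +20; threshold 60
    decide (score1 + score2 + 20 ≥ 60)

-- ===== PORT B =====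
-- B is simpler: same veto guards, but the dead score/threshold machinery and the dead
-- abbreviation scan are removed; the result is exactly "first word of head_B is a continuation word".
def pvContinuationWordsB : List String :=
  ["and", "but", "or", "yet", "so", "for", "nor",
   "this", "that", "these", "those", "which", "who", "whom",
   "in", "on", "at", "by", "with", "from", "to", "of",
   "however", "therefore", "thus", "hence", "then", "also"]

-- hand-ported rstrip(',;:') as in port A; exact
def pvRstripPunctB (cs : List Char) : List Char :=
  (cs.reverse.dropWhile (fun c => c == ',' || c == ';' || c == ':')).reverse

def is_sentence_midpage_break_py_alt (block_A_content : String) (block_B_content : String) : Bool :=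
  let tail_A := PySem.Str.rstrip block_A_content
  let head_B := PySem.Str.lstrip block_B_content
  if PySem.Str.len tail_A == 0 || PySem.Str.len head_B == 0 then false
  else if PySem.Str.endswith tail_A "." || PySem.Str.endswith tail_A "?" ||
          PySem.Str.endswith tail_A "!" || PySem.Str.endswith tail_A "-" then false
  else if (match head_B.toList with
           | c :: _ => PySem.Chars.isupper c
           | [] => false) ||
          (["Chapter", "Section", "Figure", "Table"].any
             (fun pat => PySem.Str.startswith head_B pat)) then false
  else
    match PySem.Str.split₀ head_B with
    | [] => false
    | w :: _ =>
      pvContinuationWordsB.contains (String.mk (pvRstripPunctB (PySem.Str.lower w).toList))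

-- ===== PRECONDITION & SPEC =====
def Spec_is_sentence_midpage_break_py (block_A_content : String) (block_B_content : String) (out : Bool) : Prop := out = is_sentence_midpage_break_py_alt block_A_content block_B_content
instance (block_A_content : String) (block_B_content : String) (out : Bool) : Decidable (Spec_is_sentence_midpage_break_py block_A_content block_B_content out) := by unfold Spec_is_sentence_midpage_break_py; infer_instance

-- ===== CLAIM (what is proved, stated in full; the proofs are below) =====
def Claim_equal_is_sentence_midpage_break_py : Prop := ∀ (block_A_content : String) (block_B_content : String), Dom_is_sentence_midpage_break_py block_A_content block_B_content → Spec_is_sentence_midpage_break_py block_A_content block_B_content (is_sentence_midpage_break_py block_A_content block_B_content)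

-- ===== LEMMAS AND PROOFS =====

-- ===== VERDICT (by name: the statement is the Claim_ definition above) =====
-- every abbreviation ends with '.', so a suffix-abbreviation forces a suffix '.'
lemma pv_endswith_dot_of_abbr (s p : String)
    (hp : PySem.Chars.endswith p.toList ['.'] = true)
    (h : PySem.Str.endswith s p = true) :
    PySem.Str.endswith s "." = true := by
  simp only [PySem.Str.endswith_eq, PySem.Chars.endswith_iff] at *
  exact hp.trans h

set_option maxHeartbeats 1000000 in
theorem is_sentence_midpage_break_py_spec : Claim_equal_is_sentence_midpage_break_py := by
  intro a b _
  unfold Spec_is_sentence_midpage_break_py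
  unfold is_sentence_midpage_break_py is_sentence_midpage_break_py_alt
  simp only [pvContinuationWordsB, pvContinuationWords, pvRstripPunctB, pvRstripPunct,
    pvAbbrEndings]
  cases h0 : (PySem.Str.len (PySem.Str.rstrip a) == 0 || PySem.Str.len (PySem.Str.lstrip b) == 0) with
  | true => exact show (false : Bool) = false from rfl
  | false =>
  cases hdot : PySem.Str.endswith (PySem.Str.rstrip a) "." with
  | true => exact show (false : Bool) = false from rfl
  | false =>
  cases hq : PySem.Str.endswith (PySem.Str.rstrip a) "?" with
  | true => exact show (false : Bool) = false from rfl
  | false =>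
  cases hx : PySem.Str.endswith (PySem.Str.rstrip a) "!" with
  | true => exact show (false : Bool) = false from rfl
  | false =>
  cases hhyp : PySem.Str.endswith (PySem.Str.rstrip a) "-" with
  | true =>
    cases hab : (["e.g.", "i.e.", "et al.", "Dr.", "Prof.", "Fig.", "Table.",
        "vs.", "cf.", "pp.", "No.", "vol.", "Sec."] : List String).any
        (fun abbr => PySem.Str.endswith (PySem.Str.rstrip a) abbr) with
    | true => exact show (false : Bool) = false from rfl
    | false => exact show (false : Bool) = false from rfl
  | false =>
  cases hab : (["e.g.", "i.e.", "et al.", "Dr.", "Prof.", "Fig.", "Table.",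
      "vs.", "cf.", "pp.", "No.", "vol.", "Sec."] : List String).any
      (fun abbr => PySem.Str.endswith (PySem.Str.rstrip a) abbr) with
  | true =>
    exfalso
    rcases List.any_eq_true.mp hab with ⟨s, hmem, hE⟩
    have hdotT := pv_endswith_dot_of_abbr _ s (by fin_cases hmem <;> decide) hE
    rw [hdot] at hdotT
    exact Bool.false_ne_true hdotT
  | false =>
  cases hup : (match (PySem.Str.lstrip b).toList with
               | c :: _ => PySem.Chars.isupper c
               | [] => false) with
  | true => exact show (false : Bool) = false from rfl
  | false =>
  cases hch : (["Chapter", "Section", "Figure", "Table"] : List String).any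
      (fun pat => PySem.Str.startswith (PySem.Str.lstrip b) pat) with
  | true => exact show (false : Bool) = false from rfl
  | false =>
  simp only [Bool.or_false]
  cases hs : PySem.Str.split₀ (PySem.Str.lstrip b) with
  | nil =>
    cases h2 : (PySem.Str.split₀ (PySem.Str.rstrip a)).reverse with
    | nil => decide
    | cons v vs =>
      dsimp only
      simp
      try split <;> omega
  | cons w ws =>
    dsimp only
    cases h2 : (PySem.Str.split₀ (PySem.Str.rstrip a)).reverse with
    | nil =>
      dsimp only
      simp
      try split_ifs <;> simp_all
    | cons v vs =>
      dsimp only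
      simp
      try split_ifs <;> simp_all
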